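-- pv_equiv track=rewrite | github.com/RainbowBatch/wiki_bot | transcript_processing/video2graph.py | parse_entities_and_relationships
-- ===== SOURCE A (Python) =====
-- def parse_entities_and_relationships(input_str):
--     # Parse the input string
--     entities = []
--     relationships = []
--     entity_mode = True
--     # Skip the first line
--     for line in input_str.split("\n")[1:]:
--         if line == "relationships":
--             entity_mode = False
--         elif line:
--             if entity_mode:
--                 # Make sure the rel is in correct format
--                 # GPT-4 sometimes returns n/a when no entities are found
--                 if len(line.split(", ")) != 3:
--                     continue
--                 entities.append(line.split(", "))
--             else:
--                 # Make sure the rel is in correct format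
--                 # GPT-4 sometimes returns n/a when no rels are found
--                 if len(line.split(", ")) != 3:
--                     continue
--                 relationships.append(line.split(", "))
--     return entities, relationships
-- ===== SOURCE B (Python) =====
-- def parse_entities_and_relationships(input_str):
--     lines = input_str.split("\n")[1:]
--     try:
--         i = lines.index("relationships")
--         ent_sec, rel_sec = lines[:i], lines[i + 1:]
--     except ValueError:
--         ent_sec, rel_sec = lines, []
--
--     def triples(section):
--         return [parts for line in section
--                 if line and len(parts := line.split(", ")) == 3]
--
--     return triples(ent_sec), triples(rel_sec)
-- ===== Notes on version B (the rewrite author's own statement) =====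
-- stated objective: simpler
-- what changed: Replaces the stateful entity_mode flag loop by partitioning the lines at the first 'relationships' delimiter and applying one shared filter-comprehension helper to each section.
import Mathlib
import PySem

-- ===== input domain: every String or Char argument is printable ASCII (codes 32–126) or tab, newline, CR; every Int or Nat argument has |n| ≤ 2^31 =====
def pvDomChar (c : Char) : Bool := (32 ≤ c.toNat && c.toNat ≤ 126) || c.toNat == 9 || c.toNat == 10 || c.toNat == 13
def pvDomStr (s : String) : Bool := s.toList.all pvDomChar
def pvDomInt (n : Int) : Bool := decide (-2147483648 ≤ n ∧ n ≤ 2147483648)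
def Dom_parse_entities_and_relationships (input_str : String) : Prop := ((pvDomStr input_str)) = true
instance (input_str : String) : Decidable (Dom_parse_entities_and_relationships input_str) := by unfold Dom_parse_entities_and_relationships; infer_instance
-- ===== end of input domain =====

-- B replaces A's stateful entity_mode loop by partitioning the lines at the first
-- "relationships" delimiter and applying one shared filter helper to each section (simpler).

-- s.split(sep) for a nonempty literal sep (split? is some there; getD unwraps)
def pvSplit (s sep : String) : List String := (PySem.Str.split? s sep).getD []

-- ===== PORT A =====
-- one iteration of A's loop; state = (entities, relationships, entity_mode)
def pvStepA (st : List (List String) × List (List String) × Bool) (line : String) :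
    List (List String) × List (List String) × Bool :=
  if line = "relationships" then (st.1, st.2.1, false)
  else if line ≠ "" then
    if st.2.2 then
      if (pvSplit line ", ").length ≠ 3 then st
      else (st.1 ++ [pvSplit line ", "], st.2.1, st.2.2)
    else
      if (pvSplit line ", ").length ≠ 3 then st
      else (st.1, st.2.1 ++ [pvSplit line ", "], st.2.2)
  else st

def parse_entities_and_relationships (input_str : String) : List (List String) × List (List String) :=
  -- input_str.split("\n")[1:], then the for-loop as a fold over the same state
  let st := (PySem.List.slice (pvSplit input_str "\n") (some 1) none).foldl pvStepA ([], [], true)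
  (st.1, st.2.1)

-- ===== PORT B =====
-- [parts for line in section if line and len(parts := line.split(", ")) == 3]
def pvTriples (sec : List String) : List (List String) :=
  sec.filterMap (fun line =>
    let parts := pvSplit line ", "
    if line ≠ "" ∧ parts.length = 3 then some parts else none)

def parse_entities_and_relationships_alt (input_str : String) : List (List String) × List (List String) :=
  let lines := PySem.List.slice (pvSplit input_str "\n") (some 1) none
  match PySem.List.index? lines "relationships" with
  | some i => (pvTriples (PySem.List.slice lines none (some (i : Int))),
               pvTriples (PySem.List.slice lines (some ((i : Int) + 1)) none))
  | none => (pvTriples lines, [])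

-- ===== PRECONDITION & SPEC =====
def Spec_parse_entities_and_relationships (input_str : String) (out : List (List String) × List (List String)) : Prop := out = parse_entities_and_relationships_alt input_str
instance (input_str : String) (out : List (List String) × List (List String)) : Decidable (Spec_parse_entities_and_relationships input_str out) := by unfold Spec_parse_entities_and_relationships; infer_instance

-- ===== CLAIM (what is proved, stated in full; the proofs are below) =====
def Claim_equal_parse_entities_and_relationships : Prop := ∀ (input_str : String), Dom_parse_entities_and_relationships input_str → Spec_parse_entities_and_relationships input_str (parse_entities_and_relationships input_str)

-- ===== LEMMAS AND PROOFS =====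

theorem pvTriples_cons (a : String) (t : List String) :
    pvTriples (a :: t) =
      (if a ≠ "" ∧ (pvSplit a ", ").length = 3
       then pvSplit a ", " :: pvTriples t else pvTriples t) := by
  simp only [pvTriples, List.filterMap_cons]
  split_ifs <;> simp_all

theorem pvTriples_rel_cons (t : List String) :
    pvTriples ("relationships" :: t) = pvTriples t := by
  rw [pvTriples_cons, if_neg (by decide)]

theorem pvStepA_rel (st : List (List String) × List (List String) × Bool) :
    pvStepA st "relationships" = (st.1, st.2.1, false) := by
  simp [pvStepA]

-- in relationship-mode (flag = false) A appends exactly the triples of the rest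
theorem foldl_false (sec : List String) (e r : List (List String)) :
    sec.foldl pvStepA (e, r, false) = (e, r ++ pvTriples sec, false) := by
  induction sec generalizing r with
  | nil => simp [pvTriples]
  | cons a t ih =>
    rw [List.foldl_cons]
    by_cases ha : a = "relationships"
    · subst ha
      rw [pvTriples_rel_cons]
      simpa [pvStepA] using ih r
    · rw [pvTriples_cons]
      by_cases he : a = ""
      · subst he; simp [pvStepA, ih]
      · by_cases hl : (pvSplit a ", ").length = 3
        · simp [pvStepA, ha, he, hl, ih]
        · simp [pvStepA, ha, he, hl, ih]

-- in entity-mode, with no delimiter present, A appends exactly the triples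
theorem foldl_true (sec : List String) (e r : List (List String))
    (h : "relationships" ∉ sec) :
    sec.foldl pvStepA (e, r, true) = (e ++ pvTriples sec, r, true) := by
  induction sec generalizing e with
  | nil => simp [pvTriples]
  | cons a t ih =>
    simp only [List.mem_cons, not_or] at h
    rw [List.foldl_cons, pvTriples_cons]
    by_cases he : a = ""
    · subst he; simp [pvStepA, ih _ h.2]
    · by_cases hl : (pvSplit a ", ").length = 3
      · simp [pvStepA, Ne.symm h.1, he, hl, ih _ h.2]
      · simp [pvStepA, Ne.symm h.1, he, hl, ih _ h.2]

-- ===== VERDICT (by name: the statement is the Claim_ definition above) =====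
theorem parse_entities_and_relationships_spec : Claim_equal_parse_entities_and_relationships := by
  intro input_str _
  unfold Spec_parse_entities_and_relationships
  unfold parse_entities_and_relationships parse_entities_and_relationships_alt
  set lines := PySem.List.slice (pvSplit input_str "\n") (some 1) none with hl
  clear_value lines
  cases hidx : PySem.List.index? lines "relationships" with
  | none =>
    have hmem : "relationships" ∉ lines := (PySem.List.index?_eq_none_iff _ _).1 hidx
    simp only [hidx, foldl_true lines [] [] hmem, List.nil_append]
  | some i =>
    obtain ⟨pre, suf, hsplit, hlen, hpre⟩ := (PySem.List.index?_eq_some_iff _ _ _).1 hidx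
    subst hsplit
    have h1 : PySem.List.slice (pre ++ "relationships" :: suf) none (some (i : Int)) = pre := by
      rw [PySem.List.slice_to_natCast, ← hlen, List.take_left]
    have h2 : PySem.List.slice (pre ++ "relationships" :: suf) (some ((i : Int) + 1)) none = suf := by
      have hc : (i : Int) + 1 = ((i + 1 : Nat) : Int) := by push_cast; ring
      rw [hc, PySem.List.slice_from_natCast, ← hlen]
      have hre : pre ++ "relationships" :: suf = (pre ++ ["relationships"]) ++ suf := by simp
      rw [hre, show pre.length + 1 = (pre ++ ["relationships"]).length by simp, List.drop_left]
    rw [List.foldl_append, foldl_true pre [] [] hpre, List.foldl_cons, pvStepA_rel,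
      foldl_false]
    simp only [hidx, h1, h2]
    simp
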